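-- pv_equiv track=rewrite | github.com/songhetian/LeiXiSystemV1 | scripts/enhanced_button_replacer.py | analyze_button_style
-- ===== SOURCE A (Python) =====
-- def analyze_button_style(classname):
--     """分析按钮样式并确定合适的 variant"""
--     classname = classname.lower()
--
--     # 危险/删除按钮 - destructive
--     if any(
--         keyword in classname
--         for keyword in [
--             "bg-red",
--             "text-red",
--             "destructive",
--             "danger",
--             "bg-error",
--             "text-error",
--             "delete",
--             "remove",
--         ]
--     ):
--         return "destructive"
--
--     # 边框按钮 - outline
--     if any(
--         keyword in classname
--         for keyword in ["border", "outline", "bg-white", "bg-transparent"]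
--     ) and not any(
--         keyword in classname
--         for keyword in ["bg-red", "bg-blue", "bg-green", "bg-primary"]
--     ):
--         return "outline"
--
--     # 幽灵按钮 - ghost
--     if any(
--         keyword in classname
--         for keyword in ["ghost", "bg-gray-100", "bg-gray-200", "hover:bg-gray"]
--     ):
--         return "ghost"
--
--     # 链接按钮 - link
--     if (
--         any(
--             keyword in classname
--             for keyword in ["text-blue", "text-primary", "underline"]
--         )
--         and "bg-" not in classname
--     ):
--         return "link"
--
--     # 次要按钮 - secondary
--     if any(
--         keyword in classname
--         for keyword in ["bg-secondary", "bg-gray", "bg-neutral"]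
--     ):
--         return "secondary"
--
--     # 默认按钮 - primary/default
--     return "default"
-- ===== SOURCE B (Python) =====
-- # One-pass substring scanner: walk the string once, marking which keywords start
-- # at each position, then decide the variant from the collected keyword set.
--
-- KEYWORDS = [
--     "bg-red", "text-red", "destructive", "danger", "bg-error", "text-error",
--     "delete", "remove",
--     "border", "outline", "bg-white", "bg-transparent",
--     "bg-blue", "bg-green", "bg-primary",
--     "ghost", "bg-gray-100", "bg-gray-200", "hover:bg-gray",
--     "text-blue", "text-primary", "underline",
--     "bg-secondary", "bg-gray", "bg-neutral",
--     "bg-",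
-- ]
--
--
-- def analyze_button_style(classname):
--     s = classname.lower()
--     found = set()
--     for i in range(len(s)):
--         for k in KEYWORDS:
--             if s.startswith(k, i):
--                 found.add(k)
--
--     if any(k in found for k in ["bg-red", "text-red", "destructive", "danger",
--                                 "bg-error", "text-error", "delete", "remove"]):
--         return "destructive"
--     if any(k in found for k in ["border", "outline", "bg-white",
--                                 "bg-transparent"]) and not any(
--             k in found for k in ["bg-red", "bg-blue", "bg-green", "bg-primary"]):
--         return "outline"
--     if any(k in found for k in ["ghost", "bg-gray-100", "bg-gray-200",
--                                 "hover:bg-gray"]):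
--         return "ghost"
--     if any(k in found for k in ["text-blue", "text-primary",
--                                 "underline"]) and "bg-" not in found:
--         return "link"
--     if any(k in found for k in ["bg-secondary", "bg-gray", "bg-neutral"]):
--         return "secondary"
--     return "default"
-- ===== Notes on version B (the rewrite author's own statement) =====
-- stated objective: alternative
-- what changed: Instead of running a separate substring search per keyword inside an if-chain, B makes one left-to-right scan over the string, collecting at each position the set of keywords that start there, and then classifies from that precomputed keyword set.
import Mathlib
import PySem

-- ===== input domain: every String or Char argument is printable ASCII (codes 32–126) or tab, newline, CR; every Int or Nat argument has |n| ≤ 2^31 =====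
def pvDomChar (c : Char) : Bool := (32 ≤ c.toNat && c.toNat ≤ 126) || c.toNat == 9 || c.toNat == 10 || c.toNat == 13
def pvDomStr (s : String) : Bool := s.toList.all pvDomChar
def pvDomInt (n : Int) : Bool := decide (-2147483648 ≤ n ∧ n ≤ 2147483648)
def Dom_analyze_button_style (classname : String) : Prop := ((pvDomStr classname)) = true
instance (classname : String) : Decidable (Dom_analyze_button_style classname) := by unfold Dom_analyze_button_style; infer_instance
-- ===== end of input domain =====

-- B replaces A's per-keyword substring searches by a single left-to-right scan of the
-- string that collects the set of keywords starting at each position, then decides the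
-- variant from that set (objective: alternative decomposition, same cost class).

-- ===== PORT A =====
def analyze_button_style (classname : String) : String :=
  let classname := PySem.Str.lower classname
  if ["bg-red", "text-red", "destructive", "danger", "bg-error", "text-error",
      "delete", "remove"].any (fun k => PySem.Str.isIn k classname) then
    "destructive"
  else if (["border", "outline", "bg-white", "bg-transparent"].any
            (fun k => PySem.Str.isIn k classname))
          && !(["bg-red", "bg-blue", "bg-green", "bg-primary"].any
                (fun k => PySem.Str.isIn k classname)) then
    "outline"
  else if ["ghost", "bg-gray-100", "bg-gray-200", "hover:bg-gray"].any
            (fun k => PySem.Str.isIn k classname) then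
    "ghost"
  else if (["text-blue", "text-primary", "underline"].any
            (fun k => PySem.Str.isIn k classname))
          && !(PySem.Str.isIn "bg-" classname) then
    "link"
  else if ["bg-secondary", "bg-gray", "bg-neutral"].any
            (fun k => PySem.Str.isIn k classname) then
    "secondary"
  else
    "default"

-- ===== PORT B =====
def pvKeywords : List String :=
  ["bg-red", "text-red", "destructive", "danger", "bg-error", "text-error",
   "delete", "remove",
   "border", "outline", "bg-white", "bg-transparent",
   "bg-blue", "bg-green", "bg-primary",
   "ghost", "bg-gray-100", "bg-gray-200", "hover:bg-gray",
   "text-blue", "text-primary", "underline",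
   "bg-secondary", "bg-gray", "bg-neutral",
   "bg-"]

-- one pass over the positions of s; at each position mark every keyword starting there
def pvFound (s : List Char) : PySem.Set String :=
  (List.range s.length).foldl
    (fun found i =>
      pvKeywords.foldl
        (fun found k =>
          if PySem.Chars.startswith (s.drop i) k.toList then PySem.Set.add found k
          else found)
        found)
    PySem.Set.empty

def analyze_button_style_alt (classname : String) : String :=
  let found := pvFound (PySem.Str.lower classname).toList
  if ["bg-red", "text-red", "destructive", "danger", "bg-error", "text-error",
      "delete", "remove"].any (fun k => PySem.Set.contains found k) then
    "destructive"
  else if (["border", "outline", "bg-white", "bg-transparent"].any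
            (fun k => PySem.Set.contains found k))
          && !(["bg-red", "bg-blue", "bg-green", "bg-primary"].any
                (fun k => PySem.Set.contains found k)) then
    "outline"
  else if ["ghost", "bg-gray-100", "bg-gray-200", "hover:bg-gray"].any
            (fun k => PySem.Set.contains found k) then
    "ghost"
  else if (["text-blue", "text-primary", "underline"].any
            (fun k => PySem.Set.contains found k))
          && !(PySem.Set.contains found "bg-") then
    "link"
  else if ["bg-secondary", "bg-gray", "bg-neutral"].any
            (fun k => PySem.Set.contains found k) then
    "secondary"
  else
    "default"

-- ===== PRECONDITION & SPEC =====
def Spec_analyze_button_style (classname : String) (out : String) : Prop := out = analyze_button_style_alt classname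
instance (classname : String) (out : String) : Decidable (Spec_analyze_button_style classname out) := by unfold Spec_analyze_button_style; infer_instance

-- ===== CLAIM =====
def Claim_equal_analyze_button_style : Prop := ∀ (classname : String), Dom_analyze_button_style classname → Spec_analyze_button_style classname (analyze_button_style classname)

-- ===== LEMMAS AND PROOFS =====

theorem pv_mem_inner (s : List Char) (ks : List String) (acc : PySem.Set String) (x : String) :
    x ∈ ks.foldl
      (fun found k =>
        if PySem.Chars.startswith s k.toList then PySem.Set.add found k else found) acc
    ↔ x ∈ acc ∨ (x ∈ ks ∧ PySem.Chars.startswith s x.toList = true) := by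
  induction ks generalizing acc with
  | nil => simp
  | cons k ks ih =>
    rw [List.foldl_cons, ih]
    by_cases h : PySem.Chars.startswith s k.toList = true
    · rw [if_pos h]
      simp only [PySem.Set.mem_add, List.mem_cons]
      constructor
      · rintro ((hx | rfl) | ⟨hm, hs⟩)
        · exact Or.inl hx
        · exact Or.inr ⟨Or.inl rfl, h⟩
        · exact Or.inr ⟨Or.inr hm, hs⟩
      · rintro (hx | ⟨rfl | hm, hs⟩)
        · exact Or.inl (Or.inl hx)
        · exact Or.inl (Or.inr rfl)
        · exact Or.inr ⟨hm, hs⟩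
    · rw [if_neg h]
      simp only [List.mem_cons]
      constructor
      · rintro (hx | ⟨hm, hs⟩)
        · exact Or.inl hx
        · exact Or.inr ⟨Or.inr hm, hs⟩
      · rintro (hx | ⟨rfl | hm, hs⟩)
        · exact Or.inl hx
        · exact absurd hs h
        · exact Or.inr ⟨hm, hs⟩

theorem pv_mem_outer (s : List Char) (js : List Nat) (acc : PySem.Set String) (x : String) :
    x ∈ js.foldl
      (fun found i =>
        pvKeywords.foldl
          (fun found k =>
            if PySem.Chars.startswith (s.drop i) k.toList then PySem.Set.add found k
            else found) found) acc
    ↔ x ∈ acc ∨ (x ∈ pvKeywords ∧ ∃ j ∈ js, PySem.Chars.startswith (s.drop j) x.toList = true) := by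
  induction js generalizing acc with
  | nil => simp
  | cons j js ih =>
    simp only [List.foldl_cons]
    rw [ih, pv_mem_inner]
    simp only [List.exists_mem_cons_iff]
    tauto

theorem pv_contains_pvFound (t : String) (k : String)
    (hk : k ∈ pvKeywords) (hne : k.toList ≠ []) :
    PySem.Set.contains (pvFound t.toList) k = PySem.Str.isIn k t := by
  rw [Bool.eq_iff_iff, PySem.Set.contains_iff, PySem.Str.isIn_iff_infix]
  unfold pvFound
  rw [pv_mem_outer]
  simp only [PySem.Set.empty, List.not_mem_nil, false_or, List.mem_range]
  constructor
  · rintro ⟨-, j, hj, hsw⟩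
    rw [PySem.Chars.startswith_iff] at hsw
    rw [← PySem.Chars.isIn_iff_infix, ← PySem.Chars.exists_prefix_drop_iff_isIn]
    exact ⟨j, hsw⟩
  · intro hinf
    refine ⟨hk, ?_⟩
    rw [← PySem.Chars.isIn_iff_infix, ← PySem.Chars.exists_prefix_drop_iff_isIn] at hinf
    obtain ⟨j, hj⟩ := hinf
    by_cases hlt : j < t.toList.length
    · exact ⟨j, hlt, by rw [PySem.Chars.startswith_iff]; exact hj⟩
    · exfalso
      rw [List.drop_eq_nil_of_le (Nat.le_of_not_lt hlt)] at hj
      exact hne (List.prefix_nil.mp hj)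

-- ===== VERDICT =====
theorem analyze_button_style_spec : Claim_equal_analyze_button_style := by
  intro classname _
  unfold Spec_analyze_button_style analyze_button_style analyze_button_style_alt
  have h := fun k hk hne => pv_contains_pvFound (PySem.Str.lower classname) k hk hne
  simp only [List.any_cons, List.any_nil,
    h "bg-red" (by decide) (by decide), h "text-red" (by decide) (by decide),
    h "destructive" (by decide) (by decide), h "danger" (by decide) (by decide),
    h "bg-error" (by decide) (by decide), h "text-error" (by decide) (by decide),
    h "delete" (by decide) (by decide), h "remove" (by decide) (by decide),
    h "border" (by decide) (by decide), h "outline" (by decide) (by decide),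
    h "bg-white" (by decide) (by decide), h "bg-transparent" (by decide) (by decide),
    h "bg-blue" (by decide) (by decide), h "bg-green" (by decide) (by decide),
    h "bg-primary" (by decide) (by decide), h "ghost" (by decide) (by decide),
    h "bg-gray-100" (by decide) (by decide), h "bg-gray-200" (by decide) (by decide),
    h "hover:bg-gray" (by decide) (by decide), h "text-blue" (by decide) (by decide),
    h "text-primary" (by decide) (by decide), h "underline" (by decide) (by decide),
    h "bg-secondary" (by decide) (by decide), h "bg-gray" (by decide) (by decide),
    h "bg-neutral" (by decide) (by decide), h "bg-" (by decide) (by decide)]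
  rfl
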